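-- pv_equiv track=rewrite | github.com/DavidVigil/Portfolio | Criptografia/Lucifer.py | agruparMensaje2
-- ===== SOURCE A (Python) =====
-- def agruparMensaje2(mensaje): #Esta función recibe una lista de bloques de 4 caracteres y los agrupa de dos en dos para formar bloques de 8 caracteres que ya se pueden cifrar usando Lucifer
--     texto = []
--     if len(mensaje)%2 == 0:
--         bloques = (len(mensaje)//2)
--     else:
--         bloques = (len(mensaje)//2)+1
--     c=0
--     for i in range(0, bloques):
--         try:
--             texto.append(mensaje[c]+mensaje[c+1])
--         except IndexError:
--             try:
--                 texto.append(mensaje[c]+"XXXX")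
--             except:
--                 break
--         finally:
--             c+=2
--     return texto
-- ===== SOURCE B (Python) =====
-- def agruparMensaje2(mensaje):
--     # One pass with an iterator: consume the blocks two at a time,
--     # padding a trailing lone block with "XXXX".
--     it = iter(mensaje)
--     return [a + next(it, "XXXX") for a in it]
-- ===== Notes on version B (the rewrite author's own statement) =====
-- stated objective: idiomatic
-- what changed: Replaced the block-count computation, index-stepping counter and nested try/except IndexError fallback by a single iterator pass that consumes elements two at a time with next(it, "XXXX") as the pad.
import Mathlib
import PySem

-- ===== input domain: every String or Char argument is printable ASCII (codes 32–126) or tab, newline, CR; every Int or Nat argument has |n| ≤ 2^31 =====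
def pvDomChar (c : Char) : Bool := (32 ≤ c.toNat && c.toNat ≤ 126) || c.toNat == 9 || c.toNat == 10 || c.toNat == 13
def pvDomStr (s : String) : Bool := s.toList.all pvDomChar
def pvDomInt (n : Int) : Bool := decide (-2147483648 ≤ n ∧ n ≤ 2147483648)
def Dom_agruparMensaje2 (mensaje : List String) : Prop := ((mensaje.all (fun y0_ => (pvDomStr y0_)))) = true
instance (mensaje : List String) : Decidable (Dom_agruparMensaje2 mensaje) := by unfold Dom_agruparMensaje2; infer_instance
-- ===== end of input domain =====

-- B replaces A's block count, index counter and nested try/except-IndexError pad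
-- by a single iterator pass consuming two blocks at a time (objective: idiomatic).

-- ===== PORT A =====
-- the 'for i in range(0, bloques)' loop: n = remaining iterations, c = Python's counter,
-- texto = the accumulator. mensaje[c] / mensaje[c+1] are PySem.List.pyGet? (none = IndexError);
-- if mensaje[c] itself raises, the inner try re-raises and the bare 'except: break' fires.
def agruparMensaje2Loop (mensaje : List String) : List String → Int → Nat → List String
  | texto, _, 0 => texto
  | texto, c, n + 1 =>
    match PySem.List.pyGet? mensaje c, PySem.List.pyGet? mensaje (c + 1) with
    | some a, some b => agruparMensaje2Loop mensaje (texto ++ [a ++ b]) (c + 2) n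
    | some a, none   => agruparMensaje2Loop mensaje (texto ++ [a ++ "XXXX"]) (c + 2) n
    | none,   _      => texto   -- mensaje[c] raises IndexError twice → bare except → break

def agruparMensaje2 (mensaje : List String) : List String :=
  let bloques : Nat :=
    if mensaje.length % 2 == 0 then mensaje.length / 2 else mensaje.length / 2 + 1
  agruparMensaje2Loop mensaje [] 0 bloques

-- ===== PORT B =====
-- Source B's iterator pass: each step of the comprehension takes the next element a and
-- next(it, "XXXX"); structurally, recursion consuming the list two elements at a time.
def agruparMensaje2_alt : List String → List String
  | [] => []
  | [a] => [a ++ "XXXX"]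
  | a :: b :: rest => (a ++ b) :: agruparMensaje2_alt rest

-- ===== PRECONDITION & SPEC =====
def Spec_agruparMensaje2 (mensaje : List String) (out : List String) : Prop := out = agruparMensaje2_alt mensaje
instance (mensaje : List String) (out : List String) : Decidable (Spec_agruparMensaje2 mensaje out) := by unfold Spec_agruparMensaje2; infer_instance

-- ===== CLAIM (what is proved, stated in full; the proofs are below) =====
def Claim_equal_agruparMensaje2 : Prop := ∀ (mensaje : List String), Dom_agruparMensaje2 mensaje → Spec_agruparMensaje2 mensaje (agruparMensaje2 mensaje)

-- ===== LEMMAS AND PROOFS =====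

theorem agruparMensaje2Loop_eq (mensaje : List String) :
    ∀ (n : Nat) (c : Nat) (acc : List String), mensaje.length ≤ c + 2 * n →
      agruparMensaje2Loop mensaje acc (c : Int) n
        = acc ++ agruparMensaje2_alt (mensaje.drop c) := by
  intro n
  induction n with
  | zero =>
    intro c acc h
    have hd : mensaje.drop c = [] := List.drop_eq_nil_iff.mpr (by omega)
    simp [agruparMensaje2Loop, hd, agruparMensaje2_alt]
  | succ n ih =>
    intro c acc h
    have hget : PySem.List.pyGet? mensaje (c : Int) = mensaje[c]? :=
      PySem.List.pyGet?_natCast mensaje c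
    have hget1 : PySem.List.pyGet? mensaje ((c : Int) + 1) = mensaje[c + 1]? := by
      have := PySem.List.pyGet?_natCast mensaje (c + 1)
      simpa [Nat.cast_add] using this
    have hhead : mensaje[c]? = (mensaje.drop c).head? := by
      simp [List.head?_drop]
    have hhead1 : mensaje[c + 1]? = ((mensaje.drop c).drop 1).head? := by
      rw [List.drop_drop]
      simp [List.head?_drop]
    cases hd : mensaje.drop c with
    | nil =>
      have : mensaje[c]? = none := by rw [hhead, hd]; rfl
      simp [agruparMensaje2Loop, hget, this, agruparMensaje2_alt]
    | cons a l =>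
      have ha : mensaje[c]? = some a := by rw [hhead, hd]; rfl
      cases hl : l with
      | nil =>
        have hb : mensaje[c + 1]? = none := by rw [hhead1, hd, hl]; rfl
        have hd2 : mensaje.drop (c + 2) = [] := by
          have hlen := List.length_drop (l := mensaje) (i := c)
          rw [hd, hl] at hlen
          exact List.drop_eq_nil_iff.mpr (by simp at hlen; omega)
        have hc2 : ((c : Int) + 2) = ((c + 2 : Nat) : Int) := by push_cast; ring
        rw [agruparMensaje2Loop, hget, ha, hget1, hb]
        have hih := ih (c + 2) (acc ++ [a ++ "XXXX"]) (by omega)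
        rw [hd2] at hih
        dsimp only
        rw [hc2, hih]
        simp [agruparMensaje2_alt]
      | cons b rest =>
        have hb : mensaje[c + 1]? = some b := by rw [hhead1, hd, hl]; rfl
        have hd2 : mensaje.drop (c + 2) = rest := by
          have : mensaje.drop (c + 2) = (mensaje.drop c).drop 2 := by
            rw [List.drop_drop]
          rw [this, hd, hl]
          rfl
        have hc2 : ((c : Int) + 2) = ((c + 2 : Nat) : Int) := by push_cast; ring
        rw [agruparMensaje2Loop, hget, ha, hget1, hb]
        have hih := ih (c + 2) (acc ++ [a ++ b]) (by omega)
        rw [hd2] at hih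
        dsimp only
        rw [hc2, hih]
        simp [agruparMensaje2_alt]

-- ===== VERDICT (by name: the statement is the Claim_ definition above) =====
theorem agruparMensaje2_spec : Claim_equal_agruparMensaje2 := by
  intro mensaje _
  unfold Spec_agruparMensaje2 agruparMensaje2
  have hble : mensaje.length ≤ 0 + 2 * (if mensaje.length % 2 == 0 then mensaje.length / 2 else mensaje.length / 2 + 1) := by
    split <;> rename_i hcond <;> simp at hcond <;> omega
  rw [show ((0 : Int)) = ((0 : Nat) : Int) from rfl,
    agruparMensaje2Loop_eq mensaje _ 0 [] hble]
  simp
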